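-- pv_equiv track=rewrite | github.com/Julesc013/dominium | tools/inspect/interaction_inspector.py | extract_event_name
-- ===== SOURCE A (Python) =====
-- def extract_event_name(line):
--     marker = "client.interaction."
--     idx = line.find(marker)
--     if idx == -1:
--         return None
--     end = idx + len(marker)
--     while end < len(line) and (line[end].isalnum() or line[end] in "._-"):
--         end += 1
--     return line[idx:end]
-- ===== SOURCE B (Python) =====
-- def extract_event_name(line):
--     marker = "client.interaction."
--     _, sep, rest = line.partition(marker)
--     if not sep:
--         return None
--     out = marker
--     for ch in rest:
--         if ch.isalnum() or ch in "._-":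
--             out += ch
--         else:
--             break
--     return out
-- ===== Notes on version B (the rewrite author's own statement) =====
-- stated objective: idiomatic
-- what changed: Replaces manual index arithmetic (find, then a while loop advancing an end index, then a slice) with str.partition plus a for/break loop that appends the accepted characters directly to the marker.
import Mathlib
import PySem

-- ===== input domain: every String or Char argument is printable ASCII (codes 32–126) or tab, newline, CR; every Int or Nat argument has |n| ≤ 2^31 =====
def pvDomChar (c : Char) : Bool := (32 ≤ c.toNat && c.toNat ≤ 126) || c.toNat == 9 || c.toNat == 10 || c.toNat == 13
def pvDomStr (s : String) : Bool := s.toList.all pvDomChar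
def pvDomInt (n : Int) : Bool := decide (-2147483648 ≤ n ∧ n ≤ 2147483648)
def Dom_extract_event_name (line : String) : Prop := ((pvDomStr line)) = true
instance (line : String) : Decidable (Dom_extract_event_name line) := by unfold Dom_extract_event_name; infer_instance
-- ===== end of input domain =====

-- B replaces A's index arithmetic (find + while loop over an end index + slice) with
-- str.partition and a for/break loop appending accepted characters to the marker (idiomatic).

-- the test "ch.isalnum() or ch in '._-'" both Pythons apply to a single character
def evPred (c : Char) : Bool :=
  PySem.Chars.isalnum c || PySem.Chars.isIn [c] "._-".toList

-- ===== PORT A =====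
-- the while loop: "while end < len(line) and (line[end].isalnum() or line[end] in '._-'): end += 1"
-- (end starts ≥ 0, so a Nat index is exact here)
def extract_event_name_scan (s : List Char) (e : Nat) : Nat :=
  if h : e < s.length then
    if evPred s[e] then extract_event_name_scan s (e + 1) else e
  else e
termination_by s.length - e

def extract_event_name (line : String) : Option String :=
  let marker := "client.interaction."
  let idx := PySem.Str.find line marker
  if idx = -1 then none
  else
    -- idx ≥ 0 in this branch, so idx.toNat is exactly the Python int idx
    let e := extract_event_name_scan line.toList (idx.toNat + (PySem.Str.len marker).toNat)
    some (PySem.Str.slice line (some idx) (some (e : Int)))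

-- ===== PORT B =====
-- hand port of str.partition (PySem has no partition): split at the FIRST occurrence of sep,
-- ('', '', s-unchanged) shape when absent — exact for nonempty sep as used here
def extract_event_name_partition (s sep : List Char) : List Char × List Char × List Char :=
  let i := PySem.Chars.find s sep
  if i = -1 then (s, [], [])
  else (s.take i.toNat, sep, s.drop (i.toNat + sep.length))

-- the for/break loop: append each accepted character to the output
def extract_event_name_build (acc : List Char) : List Char → List Char
  | [] => acc
  | c :: cs => if evPred c then extract_event_name_build (acc ++ [c]) cs else acc

def extract_event_name_alt (line : String) : Option String :=
  let marker := "client.interaction."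
  let p := extract_event_name_partition line.toList marker.toList
  if p.2.1 = [] then none
  else some (String.ofList (extract_event_name_build marker.toList p.2.2))

-- ===== PRECONDITION & SPEC =====
def Spec_extract_event_name (line : String) (out : Option String) : Prop := out = extract_event_name_alt line
instance (line : String) (out : Option String) : Decidable (Spec_extract_event_name line out) := by unfold Spec_extract_event_name; infer_instance

-- ===== CLAIM (what is proved, stated in full; the proofs are below) =====
def Claim_equal_extract_event_name : Prop := ∀ (line : String), Dom_extract_event_name line → Spec_extract_event_name line (extract_event_name line)

-- ===== LEMMAS AND PROOFS =====

lemma build_eq (l acc : List Char) :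
    extract_event_name_build acc l = acc ++ l.takeWhile evPred := by
  induction l generalizing acc with
  | nil => simp [extract_event_name_build]
  | cons c cs ih =>
      rw [extract_event_name_build, List.takeWhile_cons]
      by_cases h : evPred c = true
      · simp [h, ih]
      · simp [h]

lemma scan_eq (s : List Char) (e : Nat) :
    extract_event_name_scan s e = e + ((s.drop e).takeWhile evPred).length := by
  fun_induction extract_event_name_scan s e with
  | case1 e h hp ih =>
      rw [List.drop_eq_getElem_cons h, List.takeWhile_cons, hp, ih]
      simp
      omega
  | case2 e h hp =>
      rw [List.drop_eq_getElem_cons h, List.takeWhile_cons]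
      simp [hp]
  | case3 e h =>
      have hd : s.drop e = [] := List.drop_eq_nil_of_le (by omega)
      simp [hd]

-- ===== VERDICT (by name: the statement is the Claim_ definition above) =====
theorem extract_event_name_spec : Claim_equal_extract_event_name := by
  intro line _
  unfold Spec_extract_event_name extract_event_name extract_event_name_alt
      extract_event_name_partition
  simp only [PySem.Str.find_eq, PySem.Str.len_eq, Int.toNat_natCast]
  set s := line.toList with hs
  set m := ("client.interaction." : String).toList with hm
  by_cases h : PySem.Chars.find s m = -1
  · simp [h]
  · have h0 : 0 ≤ PySem.Chars.find s m := by
      have := PySem.Chars.neg_one_le_find s m; omega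
    set i := (PySem.Chars.find s m).toNat with hi
    have hfi : PySem.Chars.find s m = (i : Int) := (Int.toNat_of_nonneg h0).symm
    have hpre : m <+: s.drop i := (PySem.Chars.find_spec h0).1
    have hml : m.length = 19 := by decide
    have hsplit : s.drop i = m ++ s.drop (i + 19) := by
      conv_lhs => rw [← List.take_append_drop m.length (s.drop i)]
      rw [← List.prefix_iff_eq_take.mp hpre, List.drop_drop, hml]
    set t := s.drop (i + 19) with ht
    rw [hfi]
    have hni : ¬((i : Int) = -1) := by omega
    have hne : m ≠ [] := by decide
    rw [if_neg hni, if_neg hni, hml]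
    simp only [if_neg hne]
    rw [scan_eq]
    rw [← ht]
    congr 1
    apply String.toList_inj.mp
    simp only [PySem.Str.slice, String.toList_ofList, PySem.Chars.slice_eq_listSlice]
    rw [PySem.List.slice_natCast, ← hs]
    have harith : i + 19 + (t.takeWhile evPred).length - i
        = m.length + (t.takeWhile evPred).length := by omega
    rw [harith, hsplit, List.take_length_add_append, build_eq]
    congr 1
    exact (List.prefix_iff_eq_take.mp (List.takeWhile_prefix evPred)).symm
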